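-- pv_equiv track=rewrite | github.com/sumrae412/slidegenerator | slide_generator_pkg/powerpoint_generator.py | _determine_sketch_type
-- ===== SOURCE A (Python) =====
-- def _determine_sketch_type(all_content: str, suggestion: str) -> str:
--     """Determine the most appropriate sketch type based on content and suggestion"""
--     suggestion_lower = suggestion.lower()
--
--     # Check suggestion text first for most accurate matching
--     if 'flowchart' in suggestion_lower or 'step-by-step' in suggestion_lower or 'arrows connecting' in suggestion_lower:
--         return 'flowchart'
--     elif 'side-by-side' in suggestion_lower or 'comparison' in suggestion_lower or 'two columns' in suggestion_lower:
--         return 'comparison'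
--     elif 'brain' in suggestion_lower or 'neural network' in suggestion_lower or 'ai concept' in suggestion_lower:
--         return 'ai'
--     elif 'charts and graphs' in suggestion_lower or 'bar chart' in suggestion_lower or 'dashboard' in suggestion_lower:
--         return 'data'
--     elif 'wireframe' in suggestion_lower or 'buttons' in suggestion_lower or 'user interface' in suggestion_lower:
--         return 'ui'
--     elif 'system architecture' in suggestion_lower or 'components' in suggestion_lower or 'data flow' in suggestion_lower:
--         return 'system'
--     elif 'learning path' in suggestion_lower or 'milestone markers' in suggestion_lower or 'progression' in suggestion_lower:
--         return 'learning'
--     elif 'collaboration' in suggestion_lower or 'meeting table' in suggestion_lower or 'team members' in suggestion_lower: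
--         return 'collaboration'
--     elif 'problem-solution' in suggestion_lower or 'warning icons' in suggestion_lower or 'checkmarks' in suggestion_lower:
--         return 'problem_solution'
--     elif 'timeline' in suggestion_lower or 'milestone flags' in suggestion_lower or 'progression' in suggestion_lower:
--         return 'timeline'
--     elif 'business diagrams' in suggestion_lower or 'growth arrows' in suggestion_lower or 'market segments' in suggestion_lower:
--         return 'business'
--
--     # Fallback to content analysis
--     if any(keyword in all_content for keyword in ['process', 'workflow', 'steps', 'cycle', 'development', 'build', 'deploy']):
--         return 'flowchart'
--     elif any(keyword in all_content for keyword in ['ai', 'genai', 'chatbot', 'gpt', 'model', 'prompt']):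
--         return 'ai'
--     elif any(keyword in all_content for keyword in ['compare', 'vs', 'versus', 'difference', 'before', 'after']):
--         return 'comparison'
--     elif any(keyword in all_content for keyword in ['data', 'analytics', 'chart', 'graph', 'metrics', 'visualization']):
--         return 'data'
--     elif any(keyword in all_content for keyword in ['interface', 'ui', 'app', 'website', 'screen', 'button']):
--         return 'ui'
--     elif any(keyword in all_content for keyword in ['system', 'architecture', 'components', 'api', 'database']):
--         return 'system'
--     elif any(keyword in all_content for keyword in ['learn', 'course', 'lesson', 'education', 'skill', 'training']):
--         return 'learning'
--     elif any(keyword in all_content for keyword in ['team', 'collaboration', 'meeting', 'communication']):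
--         return 'collaboration'
--     elif any(keyword in all_content for keyword in ['problem', 'solution', 'issue', 'challenge', 'fix']):
--         return 'problem_solution'
--     elif any(keyword in all_content for keyword in ['timeline', 'schedule', 'roadmap', 'phases', 'milestone']):
--         return 'timeline'
--     elif any(keyword in all_content for keyword in ['business', 'strategy', 'market', 'growth', 'revenue']):
--         return 'business'
--     else:
--         return 'generic'
-- ===== SOURCE B (Python) =====
-- # B: flat prioritized keyword tables + exhaustive hit collection + argmin of
-- # priority, instead of A's ordered early-exit if/elif chain.  Each keyword
-- # carries the rank and label of the rule it came from; all matching keywords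
-- # are collected and the lowest-ranked hit wins (min over (priority, label)
-- # tuples), which reproduces the chain's priority order exactly.
--
-- SUGGESTION_KEYWORDS = [
--     ('flowchart', 0, 'flowchart'),
--     ('step-by-step', 0, 'flowchart'),
--     ('arrows connecting', 0, 'flowchart'),
--     ('side-by-side', 1, 'comparison'),
--     ('comparison', 1, 'comparison'),
--     ('two columns', 1, 'comparison'),
--     ('brain', 2, 'ai'),
--     ('neural network', 2, 'ai'),
--     ('ai concept', 2, 'ai'),
--     ('charts and graphs', 3, 'data'),
--     ('bar chart', 3, 'data'),
--     ('dashboard', 3, 'data'),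
--     ('wireframe', 4, 'ui'),
--     ('buttons', 4, 'ui'),
--     ('user interface', 4, 'ui'),
--     ('system architecture', 5, 'system'),
--     ('components', 5, 'system'),
--     ('data flow', 5, 'system'),
--     ('learning path', 6, 'learning'),
--     ('milestone markers', 6, 'learning'),
--     ('progression', 6, 'learning'),
--     ('collaboration', 7, 'collaboration'),
--     ('meeting table', 7, 'collaboration'),
--     ('team members', 7, 'collaboration'),
--     ('problem-solution', 8, 'problem_solution'),
--     ('warning icons', 8, 'problem_solution'),
--     ('checkmarks', 8, 'problem_solution'),
--     ('timeline', 9, 'timeline'),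
--     ('milestone flags', 9, 'timeline'),
--     ('progression', 9, 'timeline'),
--     ('business diagrams', 10, 'business'),
--     ('growth arrows', 10, 'business'),
--     ('market segments', 10, 'business'),]
--
-- CONTENT_KEYWORDS = [
--     ('process', 0, 'flowchart'),
--     ('workflow', 0, 'flowchart'),
--     ('steps', 0, 'flowchart'),
--     ('cycle', 0, 'flowchart'),
--     ('development', 0, 'flowchart'),
--     ('build', 0, 'flowchart'),
--     ('deploy', 0, 'flowchart'),
--     ('ai', 1, 'ai'),
--     ('genai', 1, 'ai'),
--     ('chatbot', 1, 'ai'),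
--     ('gpt', 1, 'ai'),
--     ('model', 1, 'ai'),
--     ('prompt', 1, 'ai'),
--     ('compare', 2, 'comparison'),
--     ('vs', 2, 'comparison'),
--     ('versus', 2, 'comparison'),
--     ('difference', 2, 'comparison'),
--     ('before', 2, 'comparison'),
--     ('after', 2, 'comparison'),
--     ('data', 3, 'data'),
--     ('analytics', 3, 'data'),
--     ('chart', 3, 'data'),
--     ('graph', 3, 'data'),
--     ('metrics', 3, 'data'),
--     ('visualization', 3, 'data'),
--     ('interface', 4, 'ui'),
--     ('ui', 4, 'ui'),
--     ('app', 4, 'ui'),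
--     ('website', 4, 'ui'),
--     ('screen', 4, 'ui'),
--     ('button', 4, 'ui'),
--     ('system', 5, 'system'),
--     ('architecture', 5, 'system'),
--     ('components', 5, 'system'),
--     ('api', 5, 'system'),
--     ('database', 5, 'system'),
--     ('learn', 6, 'learning'),
--     ('course', 6, 'learning'),
--     ('lesson', 6, 'learning'),
--     ('education', 6, 'learning'),
--     ('skill', 6, 'learning'),
--     ('training', 6, 'learning'),
--     ('team', 7, 'collaboration'),
--     ('collaboration', 7, 'collaboration'),
--     ('meeting', 7, 'collaboration'),
--     ('communication', 7, 'collaboration'),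
--     ('problem', 8, 'problem_solution'),
--     ('solution', 8, 'problem_solution'),
--     ('issue', 8, 'problem_solution'),
--     ('challenge', 8, 'problem_solution'),
--     ('fix', 8, 'problem_solution'),
--     ('timeline', 9, 'timeline'),
--     ('schedule', 9, 'timeline'),
--     ('roadmap', 9, 'timeline'),
--     ('phases', 9, 'timeline'),
--     ('milestone', 9, 'timeline'),
--     ('business', 10, 'business'),
--     ('strategy', 10, 'business'),
--     ('market', 10, 'business'),
--     ('growth', 10, 'business'),
--     ('revenue', 10, 'business'),]
--
--
-- def _determine_sketch_type(all_content: str, suggestion: str) -> str: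
--     """Determine the most appropriate sketch type based on content and suggestion"""
--     suggestion_lower = suggestion.lower()
--     hits = [(p, label) for kw, p, label in SUGGESTION_KEYWORDS if kw in suggestion_lower]
--     if not hits:
--         hits = [(p, label) for kw, p, label in CONTENT_KEYWORDS if kw in all_content]
--     return min(hits)[1] if hits else 'generic'
-- ===== Notes on version B (the rewrite author's own statement) =====
-- stated objective: alternative
-- what changed: Replaces A's ordered early-exit if/elif chains with flat (keyword, priority, label) tables: B exhaustively collects every matching keyword's (priority, label) pair and returns the label of the minimum (argmin of rule rank), suggestion matched lowercased and content raw.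
import Mathlib
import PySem

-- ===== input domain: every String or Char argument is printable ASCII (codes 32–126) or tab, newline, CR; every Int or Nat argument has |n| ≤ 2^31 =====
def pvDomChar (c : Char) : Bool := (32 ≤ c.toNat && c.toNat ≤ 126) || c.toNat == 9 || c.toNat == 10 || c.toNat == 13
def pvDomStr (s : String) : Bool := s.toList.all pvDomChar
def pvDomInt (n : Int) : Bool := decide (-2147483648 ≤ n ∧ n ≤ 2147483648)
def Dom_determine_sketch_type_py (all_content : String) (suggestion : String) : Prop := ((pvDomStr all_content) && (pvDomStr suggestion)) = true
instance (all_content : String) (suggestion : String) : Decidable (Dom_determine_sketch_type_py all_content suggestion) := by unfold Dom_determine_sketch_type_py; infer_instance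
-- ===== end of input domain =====

-- B replaces A's ordered early-exit if/elif keyword chains with flat prioritized keyword
-- tables scanned exhaustively, returning the label of the minimum-priority hit (objective:
-- alternative; same cost class).

-- ===== PORT A =====
-- literal transliteration of A's if/elif chains; 'k in s' = PySem.Str.isIn k s
def determine_sketch_type_py (all_content : String) (suggestion : String) : String :=
  let sl := PySem.Str.lower suggestion
  if PySem.Str.isIn "flowchart" sl || PySem.Str.isIn "step-by-step" sl || PySem.Str.isIn "arrows connecting" sl then "flowchart"
  else if PySem.Str.isIn "side-by-side" sl || PySem.Str.isIn "comparison" sl || PySem.Str.isIn "two columns" sl then "comparison"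
  else if PySem.Str.isIn "brain" sl || PySem.Str.isIn "neural network" sl || PySem.Str.isIn "ai concept" sl then "ai"
  else if PySem.Str.isIn "charts and graphs" sl || PySem.Str.isIn "bar chart" sl || PySem.Str.isIn "dashboard" sl then "data"
  else if PySem.Str.isIn "wireframe" sl || PySem.Str.isIn "buttons" sl || PySem.Str.isIn "user interface" sl then "ui"
  else if PySem.Str.isIn "system architecture" sl || PySem.Str.isIn "components" sl || PySem.Str.isIn "data flow" sl then "system"
  else if PySem.Str.isIn "learning path" sl || PySem.Str.isIn "milestone markers" sl || PySem.Str.isIn "progression" sl then "learning"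
  else if PySem.Str.isIn "collaboration" sl || PySem.Str.isIn "meeting table" sl || PySem.Str.isIn "team members" sl then "collaboration"
  else if PySem.Str.isIn "problem-solution" sl || PySem.Str.isIn "warning icons" sl || PySem.Str.isIn "checkmarks" sl then "problem_solution"
  else if PySem.Str.isIn "timeline" sl || PySem.Str.isIn "milestone flags" sl || PySem.Str.isIn "progression" sl then "timeline"
  else if PySem.Str.isIn "business diagrams" sl || PySem.Str.isIn "growth arrows" sl || PySem.Str.isIn "market segments" sl then "business"
  else if ["process", "workflow", "steps", "cycle", "development", "build", "deploy"].any (fun k => PySem.Str.isIn k all_content) then "flowchart"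
  else if ["ai", "genai", "chatbot", "gpt", "model", "prompt"].any (fun k => PySem.Str.isIn k all_content) then "ai"
  else if ["compare", "vs", "versus", "difference", "before", "after"].any (fun k => PySem.Str.isIn k all_content) then "comparison"
  else if ["data", "analytics", "chart", "graph", "metrics", "visualization"].any (fun k => PySem.Str.isIn k all_content) then "data"
  else if ["interface", "ui", "app", "website", "screen", "button"].any (fun k => PySem.Str.isIn k all_content) then "ui"
  else if ["system", "architecture", "components", "api", "database"].any (fun k => PySem.Str.isIn k all_content) then "system"
  else if ["learn", "course", "lesson", "education", "skill", "training"].any (fun k => PySem.Str.isIn k all_content) then "learning"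
  else if ["team", "collaboration", "meeting", "communication"].any (fun k => PySem.Str.isIn k all_content) then "collaboration"
  else if ["problem", "solution", "issue", "challenge", "fix"].any (fun k => PySem.Str.isIn k all_content) then "problem_solution"
  else if ["timeline", "schedule", "roadmap", "phases", "milestone"].any (fun k => PySem.Str.isIn k all_content) then "timeline"
  else if ["business", "strategy", "market", "growth", "revenue"].any (fun k => PySem.Str.isIn k all_content) then "business"
  else "generic"

-- ===== PORT B =====
-- flat keyword tables from Source B: (keyword, priority = rule rank, label)
def pvSuggestionKeywords : List (String × Int × String) :=
  [ ("flowchart", 0, "flowchart"),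
    ("step-by-step", 0, "flowchart"),
    ("arrows connecting", 0, "flowchart"),
    ("side-by-side", 1, "comparison"),
    ("comparison", 1, "comparison"),
    ("two columns", 1, "comparison"),
    ("brain", 2, "ai"),
    ("neural network", 2, "ai"),
    ("ai concept", 2, "ai"),
    ("charts and graphs", 3, "data"),
    ("bar chart", 3, "data"),
    ("dashboard", 3, "data"),
    ("wireframe", 4, "ui"),
    ("buttons", 4, "ui"),
    ("user interface", 4, "ui"),
    ("system architecture", 5, "system"),
    ("components", 5, "system"),
    ("data flow", 5, "system"),
    ("learning path", 6, "learning"),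
    ("milestone markers", 6, "learning"),
    ("progression", 6, "learning"),
    ("collaboration", 7, "collaboration"),
    ("meeting table", 7, "collaboration"),
    ("team members", 7, "collaboration"),
    ("problem-solution", 8, "problem_solution"),
    ("warning icons", 8, "problem_solution"),
    ("checkmarks", 8, "problem_solution"),
    ("timeline", 9, "timeline"),
    ("milestone flags", 9, "timeline"),
    ("progression", 9, "timeline"),
    ("business diagrams", 10, "business"),
    ("growth arrows", 10, "business"),
    ("market segments", 10, "business") ]

def pvContentKeywords : List (String × Int × String) :=
  [ ("process", 0, "flowchart"),
    ("workflow", 0, "flowchart"),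
    ("steps", 0, "flowchart"),
    ("cycle", 0, "flowchart"),
    ("development", 0, "flowchart"),
    ("build", 0, "flowchart"),
    ("deploy", 0, "flowchart"),
    ("ai", 1, "ai"),
    ("genai", 1, "ai"),
    ("chatbot", 1, "ai"),
    ("gpt", 1, "ai"),
    ("model", 1, "ai"),
    ("prompt", 1, "ai"),
    ("compare", 2, "comparison"),
    ("vs", 2, "comparison"),
    ("versus", 2, "comparison"),
    ("difference", 2, "comparison"),
    ("before", 2, "comparison"),
    ("after", 2, "comparison"),
    ("data", 3, "data"),
    ("analytics", 3, "data"),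
    ("chart", 3, "data"),
    ("graph", 3, "data"),
    ("metrics", 3, "data"),
    ("visualization", 3, "data"),
    ("interface", 4, "ui"),
    ("ui", 4, "ui"),
    ("app", 4, "ui"),
    ("website", 4, "ui"),
    ("screen", 4, "ui"),
    ("button", 4, "ui"),
    ("system", 5, "system"),
    ("architecture", 5, "system"),
    ("components", 5, "system"),
    ("api", 5, "system"),
    ("database", 5, "system"),
    ("learn", 6, "learning"),
    ("course", 6, "learning"),
    ("lesson", 6, "learning"),
    ("education", 6, "learning"),
    ("skill", 6, "learning"),
    ("training", 6, "learning"),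
    ("team", 7, "collaboration"),
    ("collaboration", 7, "collaboration"),
    ("meeting", 7, "collaboration"),
    ("communication", 7, "collaboration"),
    ("problem", 8, "problem_solution"),
    ("solution", 8, "problem_solution"),
    ("issue", 8, "problem_solution"),
    ("challenge", 8, "problem_solution"),
    ("fix", 8, "problem_solution"),
    ("timeline", 9, "timeline"),
    ("schedule", 9, "timeline"),
    ("roadmap", 9, "timeline"),
    ("phases", 9, "timeline"),
    ("milestone", 9, "timeline"),
    ("business", 10, "business"),
    ("strategy", 10, "business"),
    ("market", 10, "business"),
    ("growth", 10, "business"),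
    ("revenue", 10, "business") ]

-- the list comprehension [(p, label) for kw, p, label in tbl if kw in s]
def pvHits (s : String) (tbl : List (String × Int × String)) : List (Int × String) :=
  (tbl.filter (fun e => PySem.Str.isIn e.1 s)).map (fun e => e.2)

-- Python's min over a non-empty list of (int, str) tuples: fold keeping the first minimum
def pvMinPair : Int × String → List (Int × String) → Int × String
  | best, [] => best
  | best, x :: rest =>
      pvMinPair (if x.1 < best.1 ∨ (x.1 = best.1 ∧ x.2 < best.2) then x else best) rest

def determine_sketch_type_py_alt (all_content : String) (suggestion : String) : String :=
  let suggestion_lower := PySem.Str.lower suggestion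
  let hits := pvHits suggestion_lower pvSuggestionKeywords
  let hits2 := if hits.isEmpty then pvHits all_content pvContentKeywords else hits
  match hits2 with
  | [] => "generic"
  | h :: t => (pvMinPair h t).2

-- ===== PRECONDITION & SPEC =====
def Spec_determine_sketch_type_py (all_content : String) (suggestion : String) (out : String) : Prop := out = determine_sketch_type_py_alt all_content suggestion
instance (all_content : String) (suggestion : String) (out : String) : Decidable (Spec_determine_sketch_type_py all_content suggestion out) := by unfold Spec_determine_sketch_type_py; infer_instance

-- ===== CLAIM (what is proved, stated in full; the proofs are below) =====
def Claim_equal_determine_sketch_type_py : Prop := ∀ (all_content : String) (suggestion : String), Dom_determine_sketch_type_py all_content suggestion → Spec_determine_sketch_type_py all_content suggestion (determine_sketch_type_py all_content suggestion)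

-- ===== LEMMAS AND PROOFS =====

-- proof-side view of A: grouped rule tables and a first-match scan
def pvSuggRules : List (List String × String) :=
  [
    (["flowchart", "step-by-step", "arrows connecting"], "flowchart"),
    (["side-by-side", "comparison", "two columns"], "comparison"),
    (["brain", "neural network", "ai concept"], "ai"),
    (["charts and graphs", "bar chart", "dashboard"], "data"),
    (["wireframe", "buttons", "user interface"], "ui"),
    (["system architecture", "components", "data flow"], "system"),
    (["learning path", "milestone markers", "progression"], "learning"),
    (["collaboration", "meeting table", "team members"], "collaboration"),
    (["problem-solution", "warning icons", "checkmarks"], "problem_solution"),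
    (["timeline", "milestone flags", "progression"], "timeline"),
    (["business diagrams", "growth arrows", "market segments"], "business") ]

def pvContRules : List (List String × String) :=
  [
    (["process", "workflow", "steps", "cycle", "development", "build", "deploy"], "flowchart"),
    (["ai", "genai", "chatbot", "gpt", "model", "prompt"], "ai"),
    (["compare", "vs", "versus", "difference", "before", "after"], "comparison"),
    (["data", "analytics", "chart", "graph", "metrics", "visualization"], "data"),
    (["interface", "ui", "app", "website", "screen", "button"], "ui"),
    (["system", "architecture", "components", "api", "database"], "system"),
    (["learn", "course", "lesson", "education", "skill", "training"], "learning"),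
    (["team", "collaboration", "meeting", "communication"], "collaboration"),
    (["problem", "solution", "issue", "challenge", "fix"], "problem_solution"),
    (["timeline", "schedule", "roadmap", "phases", "milestone"], "timeline"),
    (["business", "strategy", "market", "growth", "revenue"], "business") ]

def pvFindRule (s : String) : List (List String × String) → Option String
  | [] => none
  | (keywords, label) :: rest =>
      if keywords.any (fun k => PySem.Str.isIn k s) then some label else pvFindRule s rest

def pvFlatten : Int → List (List String × String) → List (String × Int × String)
  | _, [] => []
  | p, (kws, l) :: rs => kws.map (fun k => (k, p, l)) ++ pvFlatten (p + 1) rs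

def pvMinLabel : List (Int × String) → Option String
  | [] => none
  | h :: t => some (pvMinPair h t).2

theorem pvSuggKw_eq : pvSuggestionKeywords = pvFlatten 0 pvSuggRules := by rfl
theorem pvContKw_eq : pvContentKeywords = pvFlatten 0 pvContRules := by rfl

theorem pv_getD_if (c : Bool) (l d : String) (o : Option String) :
    (if c = true then some l else o).getD d = if c = true then l else o.getD d := by
  cases c <;> simp

-- A's chain equals the grouped first-match scan
theorem pvChain_eq (all_content suggestion : String) :
    determine_sketch_type_py all_content suggestion =
      ((pvFindRule (PySem.Str.lower suggestion) pvSuggRules).getD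
        ((pvFindRule all_content pvContRules).getD "generic")) := by
  unfold determine_sketch_type_py
  simp only [pvSuggRules, pvContRules, pvFindRule]
  simp only [pv_getD_if, Option.getD_none]
  simp only [List.any_cons, List.any_nil, Bool.or_false, Bool.or_assoc]

theorem pvHits_append (s : String) (xs ys : List (String × Int × String)) :
    pvHits s (xs ++ ys) = pvHits s xs ++ pvHits s ys := by
  simp [pvHits]

theorem pvHits_map (s : String) (kws : List String) (p : Int) (l : String) :
    pvHits s (kws.map (fun k => (k, p, l))) =
      (kws.filter (fun k => PySem.Str.isIn k s)).map (fun _ => (p, l)) := by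
  unfold pvHits
  rw [List.filter_map, List.map_map]
  rfl

theorem pvFlatten_le (s : String) :
    ∀ (rules : List (List String × String)) (p : Int) (x : Int × String),
      x ∈ pvHits s (pvFlatten p rules) → p ≤ x.1 := by
  intro rules
  induction rules with
  | nil => intro p x hx; simp [pvFlatten, pvHits] at hx
  | cons r rs ih =>
    intro p x hx
    obtain ⟨kws, l⟩ := r
    rw [pvFlatten, pvHits_append, pvHits_map] at hx
    rcases List.mem_append.mp hx with hl | hr
    · obtain ⟨k, _, hk⟩ := List.mem_map.mp hl
      rw [← hk]
    · have := ih (p + 1) x hr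
      omega

theorem pvMinPair_fix :
    ∀ (t : List (Int × String)) (h : Int × String),
      (∀ x ∈ t, x = h ∨ h.1 < x.1) → pvMinPair h t = h := by
  intro t
  induction t with
  | nil => intro h _; rfl
  | cons x t ih =>
    intro h H
    have hx := H x (List.mem_cons_self)
    have hc : (if x.1 < h.1 ∨ (x.1 = h.1 ∧ x.2 < h.2) then x else h) = h := by
      rcases hx with rfl | hlt
      · rw [if_neg]; rintro (h1 | ⟨h2, h3⟩)
        · exact lt_irrefl _ h1
        · exact lt_irrefl _ h3
      · rw [if_neg]; rintro (h1 | ⟨h2, h3⟩)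
        · omega
        · omega
    rw [pvMinPair, hc]
    exact ih h (fun y hy => H y (List.mem_cons_of_mem x hy))

theorem pvFind_eq_min (s : String) :
    ∀ (rules : List (List String × String)) (p : Int),
      pvMinLabel (pvHits s (pvFlatten p rules)) = pvFindRule s rules := by
  intro rules
  induction rules with
  | nil => intro p; rfl
  | cons r rs ih =>
    intro p
    obtain ⟨kws, l⟩ := r
    rw [pvFlatten, pvHits_append, pvHits_map, pvFindRule]
    by_cases hb : (kws.any fun k => PySem.Str.isIn k s) = true
    · rw [if_pos hb]
      have hne : kws.filter (fun k => PySem.Str.isIn k s) ≠ [] := by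
        intro hnil
        obtain ⟨k, hk, hks⟩ := List.any_eq_true.mp hb
        have := List.filter_eq_nil_iff.mp hnil k hk
        exact this hks
      cases hfe : kws.filter (fun k => PySem.Str.isIn k s) with
      | nil => exact absurd hfe hne
      | cons k ks =>
        simp only [List.map_cons, List.cons_append, pvMinLabel]
        have hmin : pvMinPair (p, l) (ks.map (fun _ => (p, l)) ++ pvHits s (pvFlatten (p + 1) rs)) = (p, l) := by
          apply pvMinPair_fix
          intro x hx
          rcases List.mem_append.mp hx with hl2 | hr2
          · left; obtain ⟨_, _, hk2⟩ := List.mem_map.mp hl2; exact hk2.symm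
          · right; have := pvFlatten_le s rs (p + 1) x hr2; omega
        rw [hmin]
    · rw [if_neg hb]
      have hfil : kws.filter (fun k => PySem.Str.isIn k s) = [] := by
        apply List.filter_eq_nil_iff.mpr
        intro k hk hks
        exact hb (List.any_eq_true.mpr ⟨k, hk, hks⟩)
      rw [hfil]
      simp only [List.map_nil, List.nil_append]
      exact ih (p + 1)

-- ===== VERDICT (by name: the statement is the Claim_ definition above) =====
theorem determine_sketch_type_py_spec : Claim_equal_determine_sketch_type_py := by
  intro all_content suggestion _
  unfold Spec_determine_sketch_type_py
  rw [pvChain_eq]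
  unfold determine_sketch_type_py_alt
  have h1 := pvFind_eq_min (PySem.Str.lower suggestion) pvSuggRules 0
  have h2 := pvFind_eq_min all_content pvContRules 0
  rw [← pvSuggKw_eq] at h1
  rw [← pvContKw_eq] at h2
  cases e1 : pvHits (PySem.Str.lower suggestion) pvSuggestionKeywords with
  | nil =>
    rw [e1] at h1
    cases e2 : pvHits all_content pvContentKeywords with
    | nil =>
      rw [e2] at h2
      simp [pvMinLabel] at h1 h2
      simp [e1, ← h1, ← h2]
    | cons h t =>
      rw [e2] at h2
      simp [pvMinLabel] at h1 h2
      simp [e1, ← h1, ← h2]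
  | cons h t =>
    rw [e1] at h1
    simp [pvMinLabel] at h1
    simp [e1, ← h1]
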